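-- pv_equiv track=rewrite | github.com/Gan04bsc/JC3012-2025-26-Network-Security-Technology | RSA/RSA_Attack.py | pollards_p_minus_1
-- ===== SOURCE A (Python) =====
-- from math import gcd
--
-- def pollards_p_minus_1(n: int, B1: int = 1_000_000, B2: int = 10_000_000) -> int | None:
--     """
--     Pollard's p-1 算法：当 n 的某个因子 p 满足 p-1 是 B-smooth 时有效
--
--     原理：
--     - 如果 p-1 的所有素因子都 ≤ B1，则称 p-1 是 B1-smooth
--     - 计算 a = 2^(B1!) mod n，则 a^(p-1) ≡ 1 (mod p)
--     - gcd(a-1, n) 可能得到因子 p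
--
--     参数：
--     - n: 待分解的合数
--     - B1: 第一阶段界限（主要计算）
--     - B2: 第二阶段界限（可选，用于处理 p-1 有一个稍大素因子的情况）
--
--     返回：
--     - 找到的非平凡因子，或 None（失败）
--     """
--     if n % 2 == 0:
--         return 2
--
--     # 第一阶段：计算 a = 2^(B1!) mod n
--     # 实际上不计算 B1!，而是累乘所有 ≤ B1 的素数幂
--     a = 2
--
--     # 生成 ≤ B1 的所有素数（简单的埃拉托斯特尼筛法）
--     def sieve_primes(limit):
--         if limit < 2:
--             return []
--         is_prime = [True] * (limit + 1)
--         is_prime[0] = is_prime[1] = False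
--         for i in range(2, int(limit**0.5) + 1):
--             if is_prime[i]:
--                 for j in range(i*i, limit + 1, i):
--                     is_prime[j] = False
--         return [i for i in range(2, limit + 1) if is_prime[i]]
--
--     primes = sieve_primes(B1)
--
--     # 对每个素数 q，计算 q^k 使得 q^k ≤ B1 < q^(k+1)
--     for q in primes:
--         q_power = q
--         while q_power <= B1:
--             a = pow(a, q, n)
--             q_power *= q
--
--     # 检查 gcd(a-1, n)
--     g = gcd(a - 1, n)
--     if 1 < g < n:
--         return g
--
--     # 第一阶段失败，尝试第二阶段（可选）
--     # 这里简化实现：只检查一些额外的素数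
--     if B2 > B1:
--         # 继续用 B1 到 B2 之间的素数
--         primes_B2 = [p for p in sieve_primes(B2) if p > B1]
--         for q in primes_B2[:100]:  # 限制数量，避免太慢
--             a = pow(a, q, n)
--             g = gcd(a - 1, n)
--             if 1 < g < n:
--                 return g
--
--     return None
-- ===== SOURCE B (Python) =====
-- # B: accumulate one big stage-1 exponent E = prod q^max (q^max <= B1) and do a single
-- # pow(2, E, n); stage-2 primes located in the sorted sieve output by bisect + slice
-- # instead of a filtering pass.
-- from math import gcd
-- from bisect import bisect_right
--
--
-- def _sieve(limit):
--     if limit < 2: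
--         return []
--     is_prime = [True] * (limit + 1)
--     is_prime[0] = is_prime[1] = False
--     for i in range(2, int(limit**0.5) + 1):
--         if is_prime[i]:
--             for j in range(i * i, limit + 1, i):
--                 is_prime[j] = False
--     return [i for i in range(2, limit + 1) if is_prime[i]]
--
--
-- def pollards_p_minus_1(n: int, B1: int = 1_000_000, B2: int = 10_000_000):
--     if n % 2 == 0:
--         return 2
--     # stage 1: one modular exponentiation with E = prod over primes q <= B1 of
--     # the largest power q^k <= B1 (equals lcm(1..B1))
--     E = 1
--     for q in _sieve(B1):
--         pw = 1
--         while pw * q <= B1: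
--             pw *= q
--         E *= pw
--     a = pow(2, E, n)
--     g = gcd(a - 1, n)
--     if 1 < g < n:
--         return g
--     if B2 > B1:
--         primes2 = _sieve(B2)
--         i = bisect_right(primes2, B1)
--         for q in primes2[i:i + 100]:
--             a = pow(a, q, n)
--             g = gcd(a - 1, n)
--             if 1 < g < n:
--                 return g
--     return None
-- ===== Notes on version B (the rewrite author's own statement) =====
-- stated objective: alternative
-- what changed: Stage 1 is restructured from one modular exponentiation per sieved prime into accumulating a single big exponent E = prod of the largest prime powers <= B1 followed by one pow(2, E, n), and stage 2 locates the primes in (B1, B2] in the sorted sieve output via bisect_right plus a slice instead of a filtering pass.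
import Mathlib
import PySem

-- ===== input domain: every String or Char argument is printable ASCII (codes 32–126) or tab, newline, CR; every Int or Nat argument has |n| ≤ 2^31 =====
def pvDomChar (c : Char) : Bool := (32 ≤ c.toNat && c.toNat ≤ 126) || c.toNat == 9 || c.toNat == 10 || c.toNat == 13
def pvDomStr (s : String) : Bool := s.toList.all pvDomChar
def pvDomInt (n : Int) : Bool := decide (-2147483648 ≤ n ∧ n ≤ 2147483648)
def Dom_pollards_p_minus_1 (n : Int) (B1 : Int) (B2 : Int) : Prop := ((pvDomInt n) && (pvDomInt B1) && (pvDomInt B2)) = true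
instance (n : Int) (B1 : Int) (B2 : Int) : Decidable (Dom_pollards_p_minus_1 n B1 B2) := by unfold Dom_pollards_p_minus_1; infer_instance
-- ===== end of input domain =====

-- B re-implements stage 1 as one accumulated exponent E = ∏ q^max followed by a single
-- modular exponentiation, and locates the stage-2 primes in the sorted sieve output by
-- bisect + slice instead of a filtering pass (objective: alternative decomposition).

-- ===== PORT A =====
-- sieve_primes(limit): identical helper in both Pythons (ported once).
-- int(limit**0.5) is ported as Nat.sqrt; exact here since the float power is exact
-- on perfect squares and its rounding error cannot cross an integer for limit ≤ 2^31.
def sievePrimes (limit : Int) : List Int :=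
  if limit < 2 then []
  else
    let arr0 := ((Array.replicate (limit.toNat + 1) true).set! 0 false).set! 1 false
    let arr := (PySem.List.pyRange 2 ((limit.toNat.sqrt : Int) + 1) 1).foldl
      (fun arr i =>
        if arr[i.toNat]! then
          (PySem.List.pyRange (i * i) (limit + 1) i).foldl (fun arr j => arr.set! j.toNat false) arr
        else arr) arr0
    (PySem.List.pyRange 2 (limit + 1) 1).filter (fun i => arr[i.toNat]!)

-- A's inner 'while q_power <= B1: a = pow(a, q, n); q_power *= q'.
-- fuel = B1.toNat + 1 makes the loop total and is never exhausted: the sieved q is ≥ 2,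
-- so the guard fails after at most log₂ B1 < fuel passes.
def innerA : Nat → Int → Int → Int → Int → Int → Int
  | 0, _, _, _, a, _ => a
  | f + 1, n, B1, q, a, qp =>
      if qp ≤ B1 then innerA f n B1 q (PySem.Int.powMod a q.toNat n) (qp * q) else a

-- the stage-2 'for q in …' loop: identical Python in A and in B (ported once)
def stage2Loop (n : Int) (qs : List Int) (a : Int) : Option Int :=
  match qs with
  | [] => none
  | q :: rest =>
      let a' := PySem.Int.powMod a q.toNat n
      let g : Int := Int.gcd (a' - 1) n
      if 1 < g ∧ g < n then some g else stage2Loop n rest a'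

def pollards_p_minus_1 (n : Int) (B1 : Int) (B2 : Int) : Option Int :=
  if PySem.Int.mod n 2 = 0 then some 2
  else
    let primes := sievePrimes B1
    let a := primes.foldl (fun a q => innerA (B1.toNat + 1) n B1 q a q) 2
    let g : Int := Int.gcd (a - 1) n
    if 1 < g ∧ g < n then some g
    else if B1 < B2 then
      stage2Loop n
        (PySem.List.slice ((sievePrimes B2).filter (fun p => decide (B1 < p))) none (some 100)) a
    else none

-- ===== PORT B =====
-- B's inner 'pw = 1; while pw * q <= B1: pw *= q' (same fuel bound as innerA)
def pwLoop : Nat → Int → Int → Int → Int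
  | 0, _, _, pw => pw
  | f + 1, B1, q, pw => if pw * q ≤ B1 then pwLoop f B1 q (pw * q) else pw

-- pow(b, E, n): Python's built-in three-argument pow, ported as binary (square-and-
-- multiply) modular exponentiation so that it is evaluable for the huge accumulated E;
-- proved equal to PySem.Int.powMod in pmf_eq_powMod below.
def pmf (b : Int) (e : Nat) (n : Int) : Int :=
  if h : e = 0 then Int.fmod 1 n
  else
    let r := pmf (Int.fmod (b * b) n) (e / 2) n
    if e % 2 = 1 then Int.fmod (b * r) n else r
termination_by e
decreasing_by exact Nat.div_lt_self (Nat.pos_of_ne_zero h) one_lt_two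

def pollards_p_minus_1_alt (n : Int) (B1 : Int) (B2 : Int) : Option Int :=
  if PySem.Int.mod n 2 = 0 then some 2
  else
    let E := (sievePrimes B1).foldl (fun E q => E * pwLoop (B1.toNat + 1) B1 q 1) 1
    let a := pmf 2 E.toNat n
    let g : Int := Int.gcd (a - 1) n
    if 1 < g ∧ g < n then some g
    else if B1 < B2 then
      let primes2 := sievePrimes B2
      let i : Nat := PySem.List.bisectRight primes2 B1
      stage2Loop n (PySem.List.slice primes2 (some (i : Int)) (some ((i : Int) + 100))) a
    else none

-- ===== PRECONDITION & SPEC =====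
def Spec_pollards_p_minus_1 (n : Int) (B1 : Int) (B2 : Int) (out : Option Int) : Prop := out = pollards_p_minus_1_alt n B1 B2
instance (n : Int) (B1 : Int) (B2 : Int) (out : Option Int) : Decidable (Spec_pollards_p_minus_1 n B1 B2 out) := by unfold Spec_pollards_p_minus_1; infer_instance

-- ===== CLAIM (what is proved, stated in full; the proofs are below) =====
def Claim_equal_pollards_p_minus_1 : Prop := ∀ (n : Int) (B1 : Int) (B2 : Int), Dom_pollards_p_minus_1 n B1 B2 → Spec_pollards_p_minus_1 n B1 B2 (pollards_p_minus_1 n B1 B2)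

-- ===== LEMMAS AND PROOFS =====

-- floor-mod congruences -------------------------------------------------------

theorem fmod_congr {n x y : Int} (h : x % n = y % n) : Int.fmod x n = Int.fmod y n := by
  have hdv : n ∣ x ↔ n ∣ y := by rw [Int.dvd_iff_emod_eq_zero, Int.dvd_iff_emod_eq_zero, h]
  rw [Int.fmod_eq_emod, Int.fmod_eq_emod, h]
  split_ifs <;> first | rfl | (exfalso; tauto)

theorem emod_fmod (x n : Int) : Int.fmod x n % n = x % n := by
  conv_rhs => rw [← Int.fmod_add_mul_fdiv x n]
  exact (Int.add_mul_emod_self_left _ _ _).symm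

theorem powMod_eq_fmod (b : Int) (e : Nat) (n : Int) :
    PySem.Int.powMod b e n = Int.fmod (b ^ e) n := rfl

theorem powMod_congr {x y n : Int} (e : Nat) (h : x % n = y % n) :
    PySem.Int.powMod x e n = PySem.Int.powMod y e n :=
  fmod_congr (Int.ModEq.pow e h)

theorem powMod_fmod (x n : Int) (e : Nat) :
    PySem.Int.powMod (Int.fmod x n) e n = PySem.Int.powMod x e n :=
  powMod_congr e (emod_fmod x n)

theorem powMod_powMod (b : Int) (e1 e2 : Nat) (n : Int) :
    PySem.Int.powMod (PySem.Int.powMod b e1 n) e2 n = PySem.Int.powMod b (e1 * e2) n := by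
  rw [powMod_eq_fmod b e1, powMod_fmod, powMod_eq_fmod, powMod_eq_fmod, ← pow_mul]

theorem fmod_mul_fmod (x y n : Int) : Int.fmod (x * Int.fmod y n) n = Int.fmod (x * y) n :=
  fmod_congr (by rw [Int.mul_emod, emod_fmod, ← Int.mul_emod])

theorem gcd_congr {x y n : Int} (h : x % n = y % n) :
    Int.gcd (x - 1) n = Int.gcd (y - 1) n := by
  rw [← Int.gcd_emod (x - 1) n, ← Int.gcd_emod (y - 1) n, Int.sub_emod, h, ← Int.sub_emod]

-- pmf is Python's pow(b, e, n) ------------------------------------------------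

theorem pmf_eq_powMod (n : Int) : ∀ (e : Nat) (b : Int), pmf b e n = PySem.Int.powMod b e n := by
  intro e
  induction e using Nat.strong_induction_on with
  | _ e ih =>
    intro b
    rw [pmf]
    by_cases h0 : e = 0
    · simp [h0, powMod_eq_fmod]
    · simp only [h0, dite_false]
      have hdiv : e / 2 < e := Nat.div_lt_self (Nat.pos_of_ne_zero h0) one_lt_two
      rw [ih (e / 2) hdiv (Int.fmod (b * b) n), powMod_fmod]
      have hbb : PySem.Int.powMod (b * b) (e / 2) n = Int.fmod (b ^ (2 * (e / 2))) n := by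
        rw [powMod_eq_fmod, ← sq, ← pow_mul]
      by_cases hodd : e % 2 = 1
      · simp only [hodd, if_true]
        rw [hbb, fmod_mul_fmod, powMod_eq_fmod]
        congr 1
        rw [show b * b ^ (2 * (e / 2)) = b ^ (2 * (e / 2) + 1) from by ring]
        congr 1
        omega
      · simp only [hodd, if_false]
        rw [hbb, powMod_eq_fmod]
        congr 2
        omega

-- the sieve output: bounds and sortedness -------------------------------------

theorem sieve_mem {L q : Int} (h : q ∈ sievePrimes L) : 2 ≤ q ∧ q ≤ L := by
  unfold sievePrimes at h
  split at h
  · simp at h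
  · have := (List.mem_filter.mp h).1
    have := PySem.List.mem_pyRange_one.mp this
    omega

theorem sieve_pairwise (L : Int) : (sievePrimes L).Pairwise (· < ·) := by
  unfold sievePrimes
  split
  · exact List.Pairwise.nil
  · exact (PySem.List.pairwise_lt_pyRange_one _ _).filter _

-- the exponent contributed by one prime ---------------------------------------

def expOf : Nat → Int → Int → Int → Int
  | 0, _, _, _ => 1
  | f + 1, B1, q, qp => if qp ≤ B1 then q * expOf f B1 q (qp * q) else 1

theorem expOf_pos (B1 q : Int) (hq : 1 ≤ q) : ∀ (f : Nat) (qp : Int), 1 ≤ expOf f B1 q qp := by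
  intro f
  induction f with
  | zero => intro qp; simp [expOf]
  | succ f ih =>
    intro qp
    simp only [expOf]
    split
    · nlinarith [ih (qp * q)]
    · exact le_refl 1

theorem pwLoop_eq (B1 q : Int) : ∀ (f : Nat) (pw : Int),
    pwLoop f B1 q pw = pw * expOf f B1 q (pw * q) := by
  intro f
  induction f with
  | zero => intro pw; simp [pwLoop, expOf]
  | succ f ih =>
    intro pw
    simp only [pwLoop, expOf]
    split
    · rw [ih (pw * q)]; ring
    · ring

theorem innerA_stop (f : Nat) (n B1 q a qp : Int) (h : ¬ qp ≤ B1) :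
    innerA (f + 1) n B1 q a qp = a := by simp [innerA, h]

theorem innerA_eq (n B1 q : Int) (hq : 2 ≤ q) : ∀ (f : Nat) (a qp : Int), qp ≤ B1 →
    innerA (f + 1) n B1 q a qp = PySem.Int.powMod a (expOf (f + 1) B1 q qp).toNat n := by
  intro f
  induction f with
  | zero =>
    intro a qp hqp
    simp [innerA, expOf, hqp]
  | succ f ih =>
    intro a qp hqp
    rw [show innerA (f + 1 + 1) n B1 q a qp
        = if qp ≤ B1 then innerA (f + 1) n B1 q (PySem.Int.powMod a q.toNat n) (qp * q) else a
        from rfl, if_pos hqp]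
    by_cases h2 : qp * q ≤ B1
    · rw [ih _ _ h2, powMod_powMod]
      have he1 : (1 : Int) ≤ expOf (f + 1) B1 q (qp * q) := expOf_pos B1 q (by omega) _ _
      rw [show expOf (f + 1 + 1) B1 q qp = q * expOf (f + 1) B1 q (qp * q) from by
        simp [expOf, hqp]]
      rw [Int.toNat_mul (by omega) (by omega)]
    · rw [innerA_stop _ _ _ _ _ _ h2,
        show expOf (f + 1 + 1) B1 q qp = if qp ≤ B1 then q * expOf (f + 1) B1 q (qp * q) else 1
          from rfl,
        if_pos hqp,
        show expOf (f + 1) B1 q (qp * q) = if qp * q ≤ B1 then q * expOf f B1 q (qp * q * q) else 1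
          from rfl,
        if_neg h2, mul_one]

-- the stage-1 fold ------------------------------------------------------------

theorem foldE_eq (B1 : Int) (F : Nat) : ∀ (qs : List Int) (E : Int),
    qs.foldl (fun E q => E * pwLoop F B1 q 1) E
      = E * (qs.map (fun q => pwLoop F B1 q 1)).prod := by
  intro qs
  induction qs with
  | nil => intro E; simp
  | cons q qs ih =>
    intro E
    simp only [List.foldl_cons, List.map_cons, List.prod_cons, ih]
    ring

theorem prodE_pos (B1 : Int) (F : Nat) (qs : List Int) (hb : ∀ q ∈ qs, 2 ≤ q ∧ q ≤ B1) :
    1 ≤ (qs.map (fun q => pwLoop F B1 q 1)).prod := by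
  refine List.one_le_prod ?_
  intro x hx
  obtain ⟨q, hq, rfl⟩ := List.mem_map.mp hx
  rw [pwLoop_eq, one_mul]
  exact le_trans (expOf_pos B1 q (by have := hb q hq; omega) F _) (le_refl _)

theorem stage1_fold (n B1 : Int) (F : Nat) : ∀ (qs : List Int),
    (∀ q ∈ qs, 2 ≤ q ∧ q ≤ B1) → ∀ (x : Int),
    qs.foldl (fun a q => innerA (F + 1) n B1 q a q) (Int.fmod x n)
      = PySem.Int.powMod x ((qs.map (fun q => pwLoop (F + 1) B1 q 1)).prod).toNat n := by
  intro qs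
  induction qs with
  | nil =>
    intro _ x
    simp [powMod_eq_fmod]
  | cons q qs ih =>
    intro hb x
    have hq := hb q (List.mem_cons_self ..)
    simp only [List.foldl_cons]
    rw [innerA_eq n B1 q hq.1 F _ q hq.2, powMod_fmod, powMod_eq_fmod,
      ih (fun p hp => hb p (List.mem_cons_of_mem _ hp)) (x ^ (expOf (F + 1) B1 q q).toNat),
      powMod_eq_fmod, powMod_eq_fmod, ← pow_mul]
    congr 2
    simp only [List.map_cons, List.prod_cons]
    rw [pwLoop_eq (f := F + 1), one_mul, one_mul]
    have h1 : (1 : Int) ≤ expOf (F + 1) B1 q q := expOf_pos B1 q (by omega) _ _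
    have h2 := prodE_pos B1 (F + 1) qs (fun p hp => hb p (List.mem_cons_of_mem _ hp))
    rw [Int.toNat_mul (by omega) (by omega)]

-- the two a-values of stage 1 agree -------------------------------------------

theorem stage1_a (n B1 : Int) :
    ((sievePrimes B1).foldl (fun a q => innerA (B1.toNat + 1) n B1 q a q) 2) % n
      = (pmf 2 ((sievePrimes B1).foldl (fun E q => E * pwLoop (B1.toNat + 1) B1 q 1) 1).toNat n) % n
    ∧ (sievePrimes B1 ≠ [] →
        (sievePrimes B1).foldl (fun a q => innerA (B1.toNat + 1) n B1 q a q) 2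
          = pmf 2 ((sievePrimes B1).foldl (fun E q => E * pwLoop (B1.toNat + 1) B1 q 1) 1).toNat n) := by
  have hb : ∀ q ∈ sievePrimes B1, 2 ≤ q ∧ q ≤ B1 := fun q hq => sieve_mem hq
  rw [pmf_eq_powMod]
  cases hp : sievePrimes B1 with
  | nil =>
    constructor
    · simp [powMod_eq_fmod, emod_fmod]
    · intro h; exact absurd rfl h
  | cons q qs =>
    rw [hp] at hb
    have hq := hb q (List.mem_cons_self ..)
    have hbt : ∀ p ∈ qs, 2 ≤ p ∧ p ≤ B1 := fun p hp' => hb p (List.mem_cons_of_mem _ hp')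
    have hmain :
        (q :: qs).foldl (fun a q => innerA (B1.toNat + 1) n B1 q a q) 2
          = PySem.Int.powMod 2 ((q :: qs).foldl (fun E q => E * pwLoop (B1.toNat + 1) B1 q 1) 1).toNat n := by
      simp only [List.foldl_cons]
      rw [innerA_eq n B1 q hq.1 B1.toNat 2 q hq.2, powMod_eq_fmod,
        stage1_fold n B1 B1.toNat qs hbt, foldE_eq, powMod_eq_fmod, powMod_eq_fmod, ← pow_mul]
      congr 2
      rw [pwLoop_eq (f := B1.toNat + 1), one_mul, one_mul, one_mul]
      have h1 : (1 : Int) ≤ expOf (B1.toNat + 1) B1 q q := expOf_pos B1 q (by omega) _ _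
      have h2 := prodE_pos B1 (B1.toNat + 1) qs hbt
      rw [Int.toNat_mul (by omega) (by omega)]
    exact ⟨by rw [hmain], fun _ => hmain⟩

-- the two stage-2 lists agree -------------------------------------------------

theorem stage2_list_eq (B1 B2 : Int) :
    PySem.List.slice ((sievePrimes B2).filter (fun p => decide (B1 < p))) none (some 100)
      = PySem.List.slice (sievePrimes B2)
          (some ((PySem.List.bisectRight (sievePrimes B2) B1 : Nat) : Int))
          (some (((PySem.List.bisectRight (sievePrimes B2) B1 : Nat) : Int) + 100)) := by
  have hle : (sievePrimes B2).Pairwise (fun a b => a ≤ b) :=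
    (sieve_pairwise B2).imp (fun h => le_of_lt h)
  obtain ⟨hk, hlo, hhi⟩ := PySem.List.bisectRight_spec (sievePrimes B2) B1 hle
  set ps := sievePrimes B2 with hps
  set k := PySem.List.bisectRight ps B1 with hkdef
  have hfil : ps.filter (fun p => decide (B1 < p)) = ps.drop k := by
    conv_lhs => rw [← List.take_append_drop k ps]
    rw [List.filter_append]
    have h1 : (ps.take k).filter (fun p => decide (B1 < p)) = [] := by
      rw [List.filter_eq_nil_iff]
      intro x hx
      obtain ⟨i, hi, rfl⟩ := List.getElem_of_mem hx
      have hlen : (List.take k ps).length = min k ps.length := List.length_take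
      have hilt : i < ps.length := by omega
      rw [List.getElem_take]
      have := hlo i hilt (by omega)
      simp only [decide_eq_true_eq]
      omega
    have h2 : (ps.drop k).filter (fun p => decide (B1 < p)) = ps.drop k := by
      rw [List.filter_eq_self]
      intro x hx
      obtain ⟨j, hj, rfl⟩ := List.getElem_of_mem hx
      rw [List.getElem_drop]
      have hlen2 : (List.drop k ps).length = ps.length - k := List.length_drop
      have hjlt : k + j < ps.length := by omega
      have := hhi (k + j) hjlt (by omega)
      simp only [decide_eq_true_eq]
      omega
    rw [h1, h2, List.nil_append]
  rw [PySem.List.slice_to _ (by norm_num), hfil,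
    show ((k : Int) + 100) = ((k : Int) + ((100 : Nat) : Int)) from by norm_num,
    PySem.List.slice_natCast_add]
  simp

-- the pipeline after stage 1 respects congruence mod n ------------------------

theorem stage2Loop_congr (n : Int) (qs : List Int) {a a' : Int} (h : a % n = a' % n) :
    stage2Loop n qs a = stage2Loop n qs a' := by
  cases qs with
  | nil => rfl
  | cons q rest => simp only [stage2Loop]; rw [powMod_congr q.toNat h]

-- ===== VERDICT (by name: the statement is the Claim_ definition above) =====
theorem pollards_p_minus_1_spec : Claim_equal_pollards_p_minus_1 := by
  intro n B1 B2 _dom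
  unfold Spec_pollards_p_minus_1 pollards_p_minus_1 pollards_p_minus_1_alt
  by_cases hpar : PySem.Int.mod n 2 = 0
  · rw [if_pos hpar, if_pos hpar]
  · simp only [hpar, if_false]
    obtain ⟨hmod, hexact⟩ := stage1_a n B1
    set aA := (sievePrimes B1).foldl (fun a q => innerA (B1.toNat + 1) n B1 q a q) 2 with haA
    set aB := pmf 2 ((sievePrimes B1).foldl (fun E q => E * pwLoop (B1.toNat + 1) B1 q 1) 1).toNat n with haB
    have hgcd : Int.gcd (aA - 1) n = Int.gcd (aB - 1) n := gcd_congr hmod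
    rw [hgcd, stage2_list_eq B1 B2, stage2Loop_congr n _ hmod]
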